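-- pv_equiv track=rewrite | github.com/crazybass81/T-Developer | backend/src/agents/implementations/parser/parser_integration_analyzer.py | _extract_monitoring_requirements
-- ===== SOURCE A (Python) =====
-- from typing import Dict, List, Any, Optional
--
-- def _extract_monitoring_requirements(requirements: List[Dict[str, Any]]) -> List[str]:
--     """모니터링 요구사항 추출"""
--     monitoring_reqs = []
--
--     monitoring_keywords = [
--         'logging', 'monitoring', 'alerting',
--         'metrics', 'analytics', 'tracking',
--         'health check', 'uptime', 'availability',
--         'performance monitoring', 'error tracking',
--         'audit trail', 'compliance logging'
--     ]
--
--     for req in requirements: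
--         description = req.get('description', '').lower()
--
--         for keyword in monitoring_keywords:
--             if keyword in description:
--                 monitoring_reqs.append(keyword)
--
--     return list(set(monitoring_reqs))
-- ===== SOURCE B (Python) =====
-- from typing import Dict, List, Any
--
-- def _extract_monitoring_requirements(requirements: List[Dict[str, Any]]) -> List[str]:
--     """Keyword-major pass: keep each keyword iff some requirement's description mentions it."""
--     monitoring_keywords = [
--         'logging', 'monitoring', 'alerting',
--         'metrics', 'analytics', 'tracking',
--         'health check', 'uptime', 'availability',
--         'performance monitoring', 'error tracking',
--         'audit trail', 'compliance logging'
--     ]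
--     return [
--         keyword for keyword in monitoring_keywords
--         if any(keyword in req.get('description', '').lower() for req in requirements)
--     ]
-- ===== Notes on version B (the rewrite author's own statement) =====
-- stated objective: simpler
-- what changed: B transposes the traversal: one list comprehension over the fixed keyword list with an any() over the requirements, which is inherently duplicate-free, replacing A's requirement-major nested loops that accumulate duplicates and then pass through list(set(...)); Pre_ excludes inputs where two or more distinct keywords match, on which A's output order is the accidental hash-dependent iteration order of a Python set.
import Mathlib
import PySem

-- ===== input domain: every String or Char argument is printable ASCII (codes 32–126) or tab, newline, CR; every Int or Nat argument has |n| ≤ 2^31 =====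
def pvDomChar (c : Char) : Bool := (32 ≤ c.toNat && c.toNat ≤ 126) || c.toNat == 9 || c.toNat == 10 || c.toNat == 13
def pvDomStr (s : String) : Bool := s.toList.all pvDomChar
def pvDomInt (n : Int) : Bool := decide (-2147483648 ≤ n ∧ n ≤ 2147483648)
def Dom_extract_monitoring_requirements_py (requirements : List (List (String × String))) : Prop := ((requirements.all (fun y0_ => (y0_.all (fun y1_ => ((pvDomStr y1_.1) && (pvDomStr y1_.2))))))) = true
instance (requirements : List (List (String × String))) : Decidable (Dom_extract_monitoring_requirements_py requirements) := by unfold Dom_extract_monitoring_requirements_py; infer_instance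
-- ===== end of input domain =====

-- B replaces A's requirement-major nested loops + list(set(...)) dedup by a single keyword-major
-- comprehension (inherently duplicate-free); Pre_ excludes inputs where A's set order is accidental.


-- the fixed keyword list (shared data, not code)
def pvKeywords : List String :=
  ["logging", "monitoring", "alerting",
   "metrics", "analytics", "tracking",
   "health check", "uptime", "availability",
   "performance monitoring", "error tracking",
   "audit trail", "compliance logging"]

-- req.get('description', '').lower() contains keyword?
def pvMatches (req : List (String × String)) (keyword : String) : Bool :=
  PySem.Str.isIn keyword (PySem.Str.lower (PySem.Dict.getD (PySem.Dict.mk req) "description" ""))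

-- ===== PORT A =====
def extract_monitoring_requirements_py (requirements : List (List (String × String))) : List String :=
  let monitoring_reqs : List String :=
    requirements.foldl (fun acc req =>
      pvKeywords.foldl (fun acc2 keyword =>
        if pvMatches req keyword then acc2 ++ [keyword] else acc2) acc) []
  PySem.Set.ofList monitoring_reqs

-- ===== PORT B =====
def extract_monitoring_requirements_py_alt (requirements : List (List (String × String))) : List String :=
  pvKeywords.filter (fun keyword => requirements.any (fun req => pvMatches req keyword))

-- ===== PRECONDITION & SPEC =====
-- Pre_ excludes inputs on which two or more distinct keywords match: there A's result order is the
-- accidental iteration order of a Python set of strings (hash-seed dependent), which no one would specify.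
def Pre_extract_monitoring_requirements_py (requirements : List (List (String × String))) : Prop :=
  (pvKeywords.filter (fun keyword => requirements.any (fun req => pvMatches req keyword))).length ≤ 1
instance (requirements : List (List (String × String))) : Decidable (Pre_extract_monitoring_requirements_py requirements) := by unfold Pre_extract_monitoring_requirements_py; infer_instance

def pvWitness_extract_monitoring_requirements_py : (List (List (String × String))) :=
  [[("description", "We need LOGGING here"), ("id", "1")], [("priority", "high")]]

def Spec_extract_monitoring_requirements_py (requirements : List (List (String × String))) (out : List String) : Prop := out = extract_monitoring_requirements_py_alt requirements
instance (requirements : List (List (String × String))) (out : List String) : Decidable (Spec_extract_monitoring_requirements_py requirements out) := by unfold Spec_extract_monitoring_requirements_py; infer_instance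

-- ===== CLAIM (what is proved, stated in full; the proofs are below) =====
def Claim_equal_extract_monitoring_requirements_py : Prop := ∀ (requirements : List (List (String × String))), Dom_extract_monitoring_requirements_py requirements → Pre_extract_monitoring_requirements_py requirements → Spec_extract_monitoring_requirements_py requirements (extract_monitoring_requirements_py requirements)

-- ===== LEMMAS AND PROOFS =====

-- A's accumulated list is the flatMap of per-requirement keyword filters.
theorem pvA_list (requirements : List (List (String × String))) :
    requirements.foldl (fun acc req =>
      pvKeywords.foldl (fun acc2 keyword =>
        if pvMatches req keyword then acc2 ++ [keyword] else acc2) acc) []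
    = requirements.flatMap (fun req => pvKeywords.filter (pvMatches req)) := by
  have h : ∀ (req : List (String × String)) (acc : List String),
      pvKeywords.foldl (fun acc2 keyword =>
        if pvMatches req keyword then acc2 ++ [keyword] else acc2) acc
      = acc ++ pvKeywords.filter (pvMatches req) := by
    intro req acc
    simpa using PySem.List.foldl_append_if (pvMatches req) id pvKeywords acc
  calc requirements.foldl (fun acc req =>
        pvKeywords.foldl (fun acc2 keyword =>
          if pvMatches req keyword then acc2 ++ [keyword] else acc2) acc) []
      = requirements.foldl (fun acc req => acc ++ pvKeywords.filter (pvMatches req)) [] := by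
        congr 1
        funext acc req
        exact h req acc
    _ = requirements.flatMap (fun req => pvKeywords.filter (pvMatches req)) := by
        simpa using PySem.List.foldl_append_eq_flatMap (fun req => pvKeywords.filter (pvMatches req)) requirements []

-- set(…) of a nonempty constant list is the singleton.
theorem pvOfList_const (a : String) :
    ∀ (l : List String), l ≠ [] → (∀ x ∈ l, x = a) → PySem.Set.ofList l = [a] := by
  intro l
  induction l with
  | nil => intro h; exact absurd rfl h
  | cons x xs ih =>
    intro _ hall
    have hx : x = a := hall x (List.mem_cons_self)
    rw [PySem.Set.ofList_cons]
    by_cases hxs : xs = []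
    · subst hxs hx; simp [PySem.Set.ofList, PySem.Set.discard]
    · have := ih hxs (fun y hy => hall y (List.mem_cons_of_mem _ hy))
      rw [this, hx]
      simp [PySem.Set.discard]

-- ===== VERDICT (by name: the statement is the Claim_ definition above) =====
theorem extract_monitoring_requirements_py_spec : Claim_equal_extract_monitoring_requirements_py := by
  intro requirements _ hpre
  unfold Spec_extract_monitoring_requirements_py
  unfold extract_monitoring_requirements_py extract_monitoring_requirements_py_alt
  simp only [pvA_list]
  set P : String → Bool := fun keyword => requirements.any (fun req => pvMatches req keyword) with hP
  unfold Pre_extract_monitoring_requirements_py at hpre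
  -- every element of the flatMap is a keyword satisfying P
  have hmem : ∀ x ∈ requirements.flatMap (fun req => pvKeywords.filter (pvMatches req)),
      x ∈ pvKeywords.filter P := by
    intro x hx
    rcases List.mem_flatMap.mp hx with ⟨req, hreq, hxf⟩
    rcases List.mem_filter.mp hxf with ⟨hxk, hm⟩
    exact List.mem_filter.mpr ⟨hxk, List.any_eq_true.mpr ⟨req, hreq, hm⟩⟩
  match hfil : pvKeywords.filter P with
  | [] =>
    have : requirements.flatMap (fun req => pvKeywords.filter (pvMatches req)) = [] := by
      apply List.eq_nil_iff_forall_not_mem.mpr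
      intro x hx
      have := hmem x hx
      rw [hfil] at this
      exact absurd this (List.not_mem_nil)
    rw [this]
    rfl
  | [k0] =>
    have hk0 : k0 ∈ pvKeywords.filter P := by rw [hfil]; exact List.mem_cons_self
    rcases List.mem_filter.mp hk0 with ⟨hk0k, hPk0⟩
    rcases List.any_eq_true.mp hPk0 with ⟨req, hreq, hm⟩
    have hne : requirements.flatMap (fun req => pvKeywords.filter (pvMatches req)) ≠ [] := by
      intro h
      have : k0 ∈ requirements.flatMap (fun req => pvKeywords.filter (pvMatches req)) :=
        List.mem_flatMap.mpr ⟨req, hreq, List.mem_filter.mpr ⟨hk0k, hm⟩⟩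
      rw [h] at this
      exact absurd this (List.not_mem_nil)
    have hall : ∀ x ∈ requirements.flatMap (fun req => pvKeywords.filter (pvMatches req)), x = k0 := by
      intro x hx
      have := hmem x hx
      rw [hfil] at this
      simpa using this
    exact pvOfList_const k0 _ hne hall
  | a :: b :: t =>
    rw [hfil] at hpre
    simp at hpre
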